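-- pv_equiv track=rewrite | github.com/zaun/jz-hdl | examples/terminal/font/add_braille.py | make_braille_bitmap
-- ===== SOURCE A (Python) =====
-- LEFT_DOTS = [
--     (0, 2, 3),   # dot 1
--     (1, 5, 6),   # dot 2
--     (2, 8, 9),   # dot 3
--     (6, 11, 12), # dot 7
-- ]
--
-- RIGHT_DOTS = [
--     (3, 2, 3),   # dot 4
--     (4, 5, 6),   # dot 5
--     (5, 8, 9),   # dot 6
--     (7, 11, 12), # dot 8
-- ]
--
-- def make_braille_bitmap(code_offset):
--     """Generate 8x16 bitmap for Braille pattern U+2800+code_offset."""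
--     rows = ["00000000"] * 16
--
--     for bit, r_start, r_end in LEFT_DOTS:
--         if code_offset & (1 << bit):
--             for r in range(r_start, r_end + 1):
--                 # Set pixels 2-3 (bits 5-4 in MSB-first)
--                 row = list(rows[r])
--                 row[2] = '1'
--                 row[3] = '1'
--                 rows[r] = ''.join(row)
--
--     for bit, r_start, r_end in RIGHT_DOTS:
--         if code_offset & (1 << bit):
--             for r in range(r_start, r_end + 1):
--                 # Set pixels 5-6 (bits 2-1 in MSB-first)
--                 row = list(rows[r])
--                 row[5] = '1'
--                 row[6] = '1'
--                 rows[r] = ''.join(row)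
--
--     return rows
-- ===== SOURCE B (Python) =====
-- ROW_BITS = {
--     2: (0, 3), 3: (0, 3),
--     5: (1, 4), 6: (1, 4),
--     8: (2, 5), 9: (2, 5),
--     11: (6, 7), 12: (6, 7),
-- }
--
-- def make_braille_bitmap(code_offset):
--     """Generate 8x16 bitmap for Braille pattern U+2800+code_offset."""
--     out = []
--     for r in range(16):
--         bits = ROW_BITS.get(r)
--         if bits is None:
--             out.append("00000000")
--         else:
--             lb, rb = bits
--             left = "11" if code_offset & (1 << lb) else "00"
--             right = "11" if code_offset & (1 << rb) else "00"
--             out.append("00" + left + "0" + right + "0")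
--     return out
-- ===== Notes on version B (the rewrite author's own statement) =====
-- stated objective: alternative
-- what changed: B replaces A's dot-major passes that repeatedly rewrite shared mutable rows with a single row-major pass that builds every bitmap row directly from a row-to-(left bit, right bit) table and the two bit tests.
import Mathlib
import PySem

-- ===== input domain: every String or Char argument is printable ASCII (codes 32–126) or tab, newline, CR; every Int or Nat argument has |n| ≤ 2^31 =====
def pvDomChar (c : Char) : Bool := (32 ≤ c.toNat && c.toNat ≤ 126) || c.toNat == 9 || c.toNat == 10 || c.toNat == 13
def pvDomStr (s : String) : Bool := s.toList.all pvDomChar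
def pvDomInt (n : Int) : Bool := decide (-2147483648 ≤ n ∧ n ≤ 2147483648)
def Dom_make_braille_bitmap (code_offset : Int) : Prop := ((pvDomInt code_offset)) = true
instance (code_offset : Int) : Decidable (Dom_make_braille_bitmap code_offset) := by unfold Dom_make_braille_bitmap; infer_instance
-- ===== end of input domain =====

-- B builds every bitmap row directly in one row-major pass from a row→(left bit, right bit)
-- table, instead of A's dot-major passes that repeatedly rewrite shared rows (objective: alternative decomposition).

-- ===== PORT A =====
-- A's module constants (bit, r_start, r_end)
def LEFT_DOTS : List (Nat × Nat × Nat) := [(0, 2, 3), (1, 5, 6), (2, 8, 9), (6, 11, 12)]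
def RIGHT_DOTS : List (Nat × Nat × Nat) := [(3, 2, 3), (4, 5, 6), (5, 8, 9), (7, 11, 12)]

-- row = list(rows[r]); row[i] = '1'; row[j] = '1'; rows[r] = ''.join(row)
def pvSetCols (s : String) (i j : Nat) : String := String.ofList ((s.toList.set i '1').set j '1')

-- one `for bit, r_start, r_end in dots:` pass (cols i,j are 2,3 for the left pass, 5,6 for the right);
-- the truthiness test `if code_offset & (1 << bit):` is PySem.Int.band ≠ 0 (Python-exact on negatives);
-- `for r in range(r_start, r_end + 1)` is List.range' r_start (r_end + 1 - r_start)
def pvDotPass (code_offset : Int) (i j : Nat) (dots : List (Nat × Nat × Nat)) (rows0 : List String) : List String :=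
  dots.foldl (fun rows d =>
    if PySem.Int.band code_offset ((1 : Int) <<< (d.1 : Int)) ≠ 0 then
      (List.range' d.2.1 (d.2.2 + 1 - d.2.1)).foldl (fun rows r =>
        rows.set r (pvSetCols (rows.getD r "") i j)) rows
    else rows) rows0

def make_braille_bitmap (code_offset : Int) : List String :=
  let rows := List.replicate 16 "00000000"
  let rows := pvDotPass code_offset 2 3 LEFT_DOTS rows
  pvDotPass code_offset 5 6 RIGHT_DOTS rows

-- ===== PORT B =====
-- B's module constant ROW_BITS: row index → (left-dot bit, right-dot bit) covering that row (a dict in Source B)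
def ROW_BITS : PySem.Dict Nat (Nat × Nat) :=
  PySem.Dict.ofList [(2, (0, 3)), (3, (0, 3)), (5, (1, 4)), (6, (1, 4)), (8, (2, 5)), (9, (2, 5)), (11, (6, 7)), (12, (6, 7))]

def make_braille_bitmap_alt (code_offset : Int) : List String :=
  (List.range 16).map (fun r =>
    match PySem.Dict.get? ROW_BITS r with
    | none => "00000000"
    | some (lb, rb) =>
      let left := if PySem.Int.band code_offset ((1 : Int) <<< (lb : Int)) ≠ 0 then "11" else "00"
      let right := if PySem.Int.band code_offset ((1 : Int) <<< (rb : Int)) ≠ 0 then "11" else "00"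
      "00" ++ left ++ "0" ++ right ++ "0")

-- ===== PRECONDITION & SPEC =====
def Spec_make_braille_bitmap (code_offset : Int) (out : List String) : Prop := out = make_braille_bitmap_alt code_offset
instance (code_offset : Int) (out : List String) : Decidable (Spec_make_braille_bitmap code_offset out) := by unfold Spec_make_braille_bitmap; infer_instance

-- ===== CLAIM (what is proved, stated in full; the proofs are below) =====
def Claim_equal_make_braille_bitmap : Prop := ∀ (code_offset : Int), Dom_make_braille_bitmap code_offset → Spec_make_braille_bitmap code_offset (make_braille_bitmap code_offset)

-- ===== LEMMAS AND PROOFS =====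

-- B's result, with Dict.get?/range/map evaluated away, leaving the 16 rows with their bit tests
theorem alt_eval (c : Int) : make_braille_bitmap_alt c =
    [ "00000000", "00000000",
      "00" ++ (if PySem.Int.band c ((1 : Int) <<< ((0 : Nat) : Int)) ≠ 0 then "11" else "00") ++ "0" ++ (if PySem.Int.band c ((1 : Int) <<< ((3 : Nat) : Int)) ≠ 0 then "11" else "00") ++ "0",
      "00" ++ (if PySem.Int.band c ((1 : Int) <<< ((0 : Nat) : Int)) ≠ 0 then "11" else "00") ++ "0" ++ (if PySem.Int.band c ((1 : Int) <<< ((3 : Nat) : Int)) ≠ 0 then "11" else "00") ++ "0",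
      "00000000",
      "00" ++ (if PySem.Int.band c ((1 : Int) <<< ((1 : Nat) : Int)) ≠ 0 then "11" else "00") ++ "0" ++ (if PySem.Int.band c ((1 : Int) <<< ((4 : Nat) : Int)) ≠ 0 then "11" else "00") ++ "0",
      "00" ++ (if PySem.Int.band c ((1 : Int) <<< ((1 : Nat) : Int)) ≠ 0 then "11" else "00") ++ "0" ++ (if PySem.Int.band c ((1 : Int) <<< ((4 : Nat) : Int)) ≠ 0 then "11" else "00") ++ "0",
      "00000000",
      "00" ++ (if PySem.Int.band c ((1 : Int) <<< ((2 : Nat) : Int)) ≠ 0 then "11" else "00") ++ "0" ++ (if PySem.Int.band c ((1 : Int) <<< ((5 : Nat) : Int)) ≠ 0 then "11" else "00") ++ "0",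
      "00" ++ (if PySem.Int.band c ((1 : Int) <<< ((2 : Nat) : Int)) ≠ 0 then "11" else "00") ++ "0" ++ (if PySem.Int.band c ((1 : Int) <<< ((5 : Nat) : Int)) ≠ 0 then "11" else "00") ++ "0",
      "00000000",
      "00" ++ (if PySem.Int.band c ((1 : Int) <<< ((6 : Nat) : Int)) ≠ 0 then "11" else "00") ++ "0" ++ (if PySem.Int.band c ((1 : Int) <<< ((7 : Nat) : Int)) ≠ 0 then "11" else "00") ++ "0",
      "00" ++ (if PySem.Int.band c ((1 : Int) <<< ((6 : Nat) : Int)) ≠ 0 then "11" else "00") ++ "0" ++ (if PySem.Int.band c ((1 : Int) <<< ((7 : Nat) : Int)) ≠ 0 then "11" else "00") ++ "0",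
      "00000000", "00000000", "00000000" ] := rfl

-- ===== VERDICT (by name: the statement is the Claim_ definition above) =====
set_option maxHeartbeats 1000000 in
theorem make_braille_bitmap_spec : Claim_equal_make_braille_bitmap := by
  intro c _
  unfold Spec_make_braille_bitmap
  rw [alt_eval]
  simp only [make_braille_bitmap, pvDotPass, LEFT_DOTS, RIGHT_DOTS,
    List.foldl_cons, List.foldl_nil, ← Bool.cond_decide]
  generalize decide (PySem.Int.band c ((1 : Int) <<< ((0 : Nat) : Int)) ≠ 0) = b0
  generalize decide (PySem.Int.band c ((1 : Int) <<< ((1 : Nat) : Int)) ≠ 0) = b1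
  generalize decide (PySem.Int.band c ((1 : Int) <<< ((2 : Nat) : Int)) ≠ 0) = b2
  generalize decide (PySem.Int.band c ((1 : Int) <<< ((3 : Nat) : Int)) ≠ 0) = b3
  generalize decide (PySem.Int.band c ((1 : Int) <<< ((4 : Nat) : Int)) ≠ 0) = b4
  generalize decide (PySem.Int.band c ((1 : Int) <<< ((5 : Nat) : Int)) ≠ 0) = b5
  generalize decide (PySem.Int.band c ((1 : Int) <<< ((6 : Nat) : Int)) ≠ 0) = b6
  generalize decide (PySem.Int.band c ((1 : Int) <<< ((7 : Nat) : Int)) ≠ 0) = b7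
  cases b0 <;> cases b1 <;> cases b2 <;> cases b3 <;>
    cases b4 <;> cases b5 <;> cases b6 <;> cases b7 <;> rfl
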